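-- pv_equiv track=rewrite | github.com/the-ai-created-company/google-mcp-fortknox | agents/agent-03-api-explorer/agent.py | _generate_method_name
-- ===== SOURCE A (Python) =====
-- from typing import Dict, List, Any, Optional
--
-- def _generate_method_name(endpoint: Dict[str, Any]) -> str:
--     """Generate method name from endpoint"""
--     method = endpoint.get("method", "GET").lower()
--     path = endpoint.get("path", "")
--
--     # Clean path
--     parts = [p for p in path.strip("/").split("/") if p and not p.startswith("{") and p not in ["api", "v1", "v2"]]
--
--     if parts:
--         resource = parts[-1]
--         return f"{method}_{resource}"
--     else:
--         return f"{method}_request"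
-- ===== SOURCE B (Python) =====
-- def _generate_method_name(endpoint):
--     """Generate method name from endpoint"""
--     method = endpoint.get("method", "GET").lower()
--     best = None
--     seg = ""
--     for ch in endpoint.get("path", "") + "/":
--         if ch == "/":
--             if seg and seg[0] != "{" and seg not in ("api", "v1", "v2"):
--                 best = seg
--             seg = ""
--         else:
--             seg += ch
--     return f"{method}_{best}" if best is not None else f"{method}_request"
-- ===== Notes on version B (the rewrite author's own statement) =====
-- stated objective: alternative
-- what changed: B replaces strip+split+filter+last with a single left-to-right character automaton over the raw path (no strip, no intermediate segment list): it accumulates the current segment between '/' characters and remembers the last qualifying one.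
import Mathlib
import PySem

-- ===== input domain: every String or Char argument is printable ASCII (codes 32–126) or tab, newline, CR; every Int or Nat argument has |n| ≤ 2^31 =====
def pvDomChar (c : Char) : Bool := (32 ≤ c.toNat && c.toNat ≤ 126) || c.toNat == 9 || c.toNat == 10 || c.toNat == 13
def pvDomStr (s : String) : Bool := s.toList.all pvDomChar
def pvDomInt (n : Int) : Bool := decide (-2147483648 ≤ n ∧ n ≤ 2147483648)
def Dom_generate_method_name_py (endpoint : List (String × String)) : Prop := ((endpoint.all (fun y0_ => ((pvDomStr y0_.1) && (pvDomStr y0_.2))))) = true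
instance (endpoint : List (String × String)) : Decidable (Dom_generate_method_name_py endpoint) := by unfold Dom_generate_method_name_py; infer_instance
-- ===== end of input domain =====

-- B replaces A's strip/split/filter/last pipeline by a single character automaton over the raw path
-- (no intermediate list of segments); same result, same cost — a different decomposition, not faster.

-- ===== PORT A =====
def generate_method_name_py (endpoint : List (String × String)) : String :=
  let method := PySem.Str.lower ((PySem.Dict.ofList endpoint).getD "method" "GET")
  let path := (PySem.Dict.ofList endpoint).getD "path" ""
  let parts := ((PySem.Str.split? (PySem.Str.stripChars path "/") "/").getD []).filter
    (fun p => p != "" && !(PySem.Str.startswith p "{") && !(["api", "v1", "v2"].contains p))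
  match parts.getLast? with
  | some resource => method ++ "_" ++ resource
  | none => method ++ "_request"

-- ===== PORT B =====
-- B works on characters; the port represents B's Python `seg : str` as its List Char (exact on all inputs).
def pvQualB (seg : List Char) : Bool :=
  match seg with
  | [] => false
  | c :: _ => c != '{' && !(seg == "api".toList || seg == "v1".toList || seg == "v2".toList)

def pvStepB (st : Option (List Char) × List Char) (ch : Char) : Option (List Char) × List Char :=
  if ch == '/' then (if pvQualB st.2 then some st.2 else st.1, [])
  else (st.1, st.2 ++ [ch])

def generate_method_name_py_alt (endpoint : List (String × String)) : String :=
  let method := PySem.Str.lower ((PySem.Dict.ofList endpoint).getD "method" "GET")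
  let path := (PySem.Dict.ofList endpoint).getD "path" ""
  match ((path.toList ++ ['/']).foldl pvStepB (none, [])).1 with
  | some best => method ++ "_" ++ String.ofList best
  | none => method ++ "_request"

-- ===== PRECONDITION & SPEC =====
def Spec_generate_method_name_py (endpoint : List (String × String)) (out : String) : Prop := out = generate_method_name_py_alt endpoint
instance (endpoint : List (String × String)) (out : String) : Decidable (Spec_generate_method_name_py endpoint out) := by unfold Spec_generate_method_name_py; infer_instance

-- ===== CLAIM (what is proved, stated in full; the proofs are below) =====
def Claim_equal_generate_method_name_py : Prop := ∀ (endpoint : List (String × String)), Dom_generate_method_name_py endpoint → Spec_generate_method_name_py endpoint (generate_method_name_py endpoint)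

-- ===== LEMMAS AND PROOFS =====

-- reference single-char split on '/', structurally recursive
def split1 : List Char → List (List Char)
  | [] => [[]]
  | c :: cs => if c = '/' then [] :: split1 cs else (split1 cs).modifyHead (c :: ·)

theorem split1_ne_nil (cs : List Char) : split1 cs ≠ [] := by
  induction cs with
  | nil => simp [split1]
  | cons c cs ih =>
    simp only [split1]
    split_ifs
    · simp
    · cases h : split1 cs with
      | nil => exact absurd h ih
      | cons hd tl => simp [List.modifyHead]

theorem splitOn_go_eq (fuel : Nat) (l cur : List Char) (acc : List (List Char))
    (h : l.length < fuel) :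
    PySem.Chars.splitOn.go ['/'] fuel l cur acc
      = acc.reverse ++ (split1 l).modifyHead (cur.reverse ++ ·) := by
  induction fuel generalizing l cur acc with
  | zero => omega
  | succ fuel ih =>
    cases l with
    | nil => simp [PySem.Chars.splitOn.go, split1, List.modifyHead]
    | cons c rest =>
      rw [PySem.Chars.splitOn.go]
      by_cases hc : c = '/'
      · subst hc
        simp only [List.isPrefixOf, beq_self_eq_true, Bool.true_and, if_pos, List.length_singleton,
          List.drop_one, List.tail_cons]
        rw [ih rest [] (cur.reverse :: acc) (by simpa using Nat.lt_of_succ_lt_succ h)]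
        simp only [split1, List.reverse_cons, List.reverse_nil, List.nil_append,
          List.modifyHead, List.append_assoc, List.singleton_append]
        cases split1 rest <;> simp
      · have hpre : (['/'].isPrefixOf (c :: rest)) = false := by
          simp only [List.isPrefixOf, Bool.and_true]
          exact beq_eq_false_iff_ne.mpr (fun hcc => hc (Eq.symm hcc))
        rw [hpre]
        simp only [Bool.false_eq_true, if_false]
        rw [ih rest (c :: cur) acc (by simpa using Nat.lt_of_succ_lt_succ h)]
        simp only [split1, hc, if_false, List.reverse_cons]
        cases hs : split1 rest with
        | nil => exact absurd hs (split1_ne_nil rest)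
        | cons hd tl => simp [List.modifyHead]

theorem splitOn_eq_split1 (s : List Char) : PySem.Chars.splitOn s ['/'] = split1 s := by
  unfold PySem.Chars.splitOn
  rw [splitOn_go_eq (s.length + 1) s [] [] (by omega)]
  cases h : split1 s with
  | nil => exact absurd h (split1_ne_nil s)
  | cons hd tl => simp [List.modifyHead]

theorem split1_noslash (seg : List Char) (h : '/' ∉ seg) : split1 seg = [seg] := by
  induction seg with
  | nil => rfl
  | cons c cs ih =>
    have hc : c ≠ '/' := fun hc => h (hc ▸ List.mem_cons_self)
    simp only [split1, hc, if_false]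
    rw [ih (fun hm => h (List.mem_cons_of_mem _ hm))]
    simp [List.modifyHead]

theorem split1_mid (seg cs : List Char) (h : '/' ∉ seg) :
    split1 (seg ++ '/' :: cs) = seg :: split1 cs := by
  induction seg with
  | nil => simp [split1]
  | cons c s ih =>
    have hc : c ≠ '/' := fun hc => h (hc ▸ List.mem_cons_self)
    simp only [List.cons_append, split1, hc, if_false]
    rw [ih (fun hm => h (List.mem_cons_of_mem _ hm))]
    simp [List.modifyHead]

theorem split1_snoc (cs : List Char) : split1 (cs ++ ['/']) = split1 cs ++ [[]] := by
  induction cs with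
  | nil => rfl
  | cons c cs ih =>
    by_cases hc : c = '/'
    · subst hc; simp [split1, ih]
    · simp only [List.cons_append, split1, hc, if_false, ih]
      cases hs : split1 cs with
      | nil => exact absurd hs (split1_ne_nil cs)
      | cons hd tl => simp [List.modifyHead]

theorem filter_split1_snoc (cs : List Char) :
    (split1 (cs ++ ['/'])).filter pvQualB = (split1 cs).filter pvQualB := by
  rw [split1_snoc]; simp [List.filter_append, pvQualB]

theorem filter_split1_dropWhile (cs : List Char) :
    (split1 (cs.dropWhile (fun c => (['/'] : List Char).contains c))).filter pvQualB
      = (split1 cs).filter pvQualB := by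
  induction cs with
  | nil => rfl
  | cons c cs ih =>
    by_cases hc : c = '/'
    · subst hc
      rw [List.dropWhile_cons_of_pos (by simp), ih]
      simp [split1, pvQualB]
    · rw [List.dropWhile_cons_of_neg (by simp [hc])]

theorem filter_split1_append_slashes (ys : List Char) (h : ∀ c ∈ ys, c = '/')
    (xs : List Char) :
    (split1 (xs ++ ys)).filter pvQualB = (split1 xs).filter pvQualB := by
  induction ys using List.reverseRecOn generalizing xs with
  | nil => simp
  | append_singleton ys c ih =>
    have hc : c = '/' := h c (by simp)
    subst hc
    rw [← List.append_assoc, filter_split1_snoc]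
    exact ih (fun d hd => h d (by simp [hd])) xs

theorem filter_split1_strip (cs : List Char) :
    (split1 (PySem.Chars.stripChars cs ['/'])).filter pvQualB
      = (split1 cs).filter pvQualB := by
  unfold PySem.Chars.stripChars
  set p : Char → Bool := fun c => (['/'] : List Char).contains c with hp
  set u : List Char := List.dropWhile p cs with hu
  have hdecomp : u = (List.dropWhile p u.reverse).reverse ++ (List.takeWhile p u.reverse).reverse := by
    calc u = u.reverse.reverse := by rw [List.reverse_reverse]
      _ = (List.takeWhile p u.reverse ++ List.dropWhile p u.reverse).reverse := by
          rw [List.takeWhile_append_dropWhile]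
      _ = (List.dropWhile p u.reverse).reverse ++ (List.takeWhile p u.reverse).reverse := by
          rw [List.reverse_append]
  calc (split1 (List.dropWhile p (List.dropWhile p cs).reverse).reverse).filter pvQualB
      = (split1 ((List.dropWhile p u.reverse).reverse ++ (List.takeWhile p u.reverse).reverse)).filter pvQualB := by
        rw [filter_split1_append_slashes _ (fun c hc => by
          have := List.mem_takeWhile_imp (List.mem_reverse.mp hc)
          simpa [hp] using this)]
    _ = (split1 u).filter pvQualB := by rw [← hdecomp]
    _ = (split1 cs).filter pvQualB := by rw [hu, filter_split1_dropWhile]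

theorem getLast?_cons_or {α : Type} (a : α) (l : List α) (b : Option α) :
    ((a :: l).getLast?).or b = (l.getLast?).or (some a) := by
  cases l with
  | nil => simp
  | cons x xs =>
    rw [List.getLast?_cons_cons]
    obtain ⟨y, hy⟩ := Option.isSome_iff_exists.mp (show (x :: xs).getLast?.isSome by simp)
    rw [hy, Option.some_or, Option.some_or]

theorem scanB_eq (cs : List Char) : ∀ (best : Option (List Char)) (seg : List Char),
    '/' ∉ seg →
    ((cs ++ ['/']).foldl pvStepB (best, seg)).1
      = (((split1 (seg ++ cs)).filter pvQualB).getLast?).or best := by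
  induction cs with
  | nil =>
    intro best seg hseg
    simp only [List.nil_append, List.foldl_cons, List.foldl_nil, pvStepB, beq_self_eq_true, if_pos,
      List.append_nil]
    rw [split1_noslash seg hseg]
    by_cases hq : pvQualB seg = true
    · simp [hq]
    · rw [Bool.not_eq_true] at hq
      simp [hq]
  | cons c cs ih =>
    intro best seg hseg
    by_cases hc : c = '/'
    · subst hc
      simp only [List.cons_append, List.foldl_cons, pvStepB, beq_self_eq_true, if_pos]
      rw [ih _ [] List.not_mem_nil]
      rw [split1_mid seg cs hseg]
      simp only [List.nil_append, List.filter_cons]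
      by_cases hq : pvQualB seg = true
      · simp only [hq, if_pos]
        rw [getLast?_cons_or]
      · simp only [Bool.not_eq_true] at hq
        simp [hq]
    · simp only [List.cons_append, List.foldl_cons, pvStepB, beq_iff_eq, hc, if_neg,
        not_false_iff]
      have hns : '/' ∉ seg ++ [c] := by
        intro hm
        rcases List.mem_append.mp hm with h1 | h1
        · exact hseg h1
        · have h2 : '/' = c := by simpa using h1
          exact hc (Eq.symm h2)
      rw [ih best (seg ++ [c]) hns]
      rw [List.append_assoc]
      simp

-- A's string-level segment predicate agrees with B's char-level one
theorem predA_eq_pvQualB (p : String) :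
    (p != "" && !(PySem.Str.startswith p "{") && !((["api", "v1", "v2"] : List String).contains p))
      = pvQualB p.toList := by
  have hbeq : ∀ (a b : String), (a == b) = (a.toList == b.toList) := by
    intro a b; simp [String.ext_iff]
  cases hl : p.toList with
  | nil =>
    have : p = "" := by
      have := congrArg String.ofList hl
      simpa [String.ofList_toList] using this
    subst this; rfl
  | cons c rest =>
    have hne : (p != "") = true := by
      simp only [bne_iff_ne, ne_eq]
      intro h; subst h; simp at hl
    rw [hne, Bool.true_and]
    have hsw : PySem.Str.startswith p "{" = (c == '{') := by
      show PySem.Chars.startswith p.toList "{".toList = (c == '{')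
      rw [hl]
      show List.isPrefixOf ['{'] (c :: rest) = (c == '{')
      simp [List.isPrefixOf, BEq.comm]
    rw [hsw]
    simp only [List.contains_cons, List.contains_nil, Bool.or_false, pvQualB]
    rw [hbeq p "api", hbeq p "v1", hbeq p "v2", hl]
    simp [Bool.or_assoc, bne, BEq.comm (a := c)]

-- ===== VERDICT (by name: the statement is the Claim_ definition above) =====
theorem generate_method_name_py_spec : Claim_equal_generate_method_name_py := by
  intro endpoint _
  unfold Spec_generate_method_name_py
  simp only [generate_method_name_py, generate_method_name_py_alt]
  set path : String := (PySem.Dict.ofList endpoint).getD "path" "" with hpath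
  -- A's split, at the char level
  have hsplit : Option.map (List.map String.toList)
      (PySem.Str.split? (PySem.Str.stripChars path "/") "/")
      = some (split1 (PySem.Chars.stripChars path.toList ['/'])) := by
    rw [PySem.Str.split?_map, PySem.Str.toList_stripChars]
    show PySem.Chars.split? _ ['/'] = _
    rw [PySem.Chars.split?]
    simp [splitOn_eq_split1]
  obtain ⟨L, hL, hmap⟩ := Option.map_eq_some_iff.mp hsplit
  rw [hL]
  -- the two filtered segment lists coincide (up to String.toList)
  have hfa : (L.filter
      (fun p => p != "" && !(PySem.Str.startswith p "{") && !((["api", "v1", "v2"] : List String).contains p))).map String.toList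
      = (split1 path.toList).filter pvQualB := by
    have : (L.map String.toList).filter pvQualB
        = (L.filter (fun p => pvQualB p.toList)).map String.toList := by
      rw [List.filter_map]; rfl
    rw [← filter_split1_strip path.toList, ← hmap, this]
    congr 1
    apply List.filter_congr
    intro p _
    exact predA_eq_pvQualB p
  -- B's scan computes the last qualifying segment
  have hb : ((path.toList ++ ['/']).foldl pvStepB (none, [])).1
      = ((split1 path.toList).filter pvQualB).getLast? := by
    rw [scanB_eq path.toList none [] (List.not_mem_nil)]
    exact Option.or_none
  rw [hb]
  have hlast : ((L.filter
      (fun p => p != "" && !(PySem.Str.startswith p "{") && !((["api", "v1", "v2"] : List String).contains p))).getLast?).map String.toList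
      = ((split1 path.toList).filter pvQualB).getLast? := by
    rw [← hfa, List.getLast?_map]
  simp only [Option.getD_some]
  cases hA : (L.filter
      (fun p => p != "" && !(PySem.Str.startswith p "{") && !((["api", "v1", "v2"] : List String).contains p))).getLast? with
  | none =>
    rw [hA] at hlast
    rw [← hlast]
    simp
  | some r =>
    rw [hA] at hlast
    rw [← hlast]
    simp [String.ofList_toList]
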